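-- pv_equiv track=rewrite | github.com/emilonpt/AOC2021 | day6/day6.py | process_day_v2
-- ===== SOURCE A (Python) =====
-- def process_day_v2(data_counts):
--     num_zeroes = data_counts[0]
--     for i in range(1,9):
--         to_add = data_counts[i]
--         to_subtract = data_counts[i-1]
--         data_counts[i - 1]  += to_add
--         data_counts[i - 1] -= to_subtract
--
--     data_counts[6] += num_zeroes
--     data_counts[8] = num_zeroes
--     return data_counts
-- ===== SOURCE B (Python) =====
-- def process_day_v2(data_counts):
--     zeros = data_counts[0]
--     shifted = data_counts[1:9] + [zeros] + data_counts[9:]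
--     shifted[6] += zeros
--     data_counts[:] = shifted
--     return data_counts
-- ===== Notes on version B (the rewrite author's own statement) =====
-- stated objective: simpler
-- what changed: Replaces the per-index shift loop (8 paired +=/-= bucket updates) with one slice-based rotation: build data_counts[1:9] + [zeros] + data_counts[9:], add zeros at index 6, and write it back in place.
import Mathlib
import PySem

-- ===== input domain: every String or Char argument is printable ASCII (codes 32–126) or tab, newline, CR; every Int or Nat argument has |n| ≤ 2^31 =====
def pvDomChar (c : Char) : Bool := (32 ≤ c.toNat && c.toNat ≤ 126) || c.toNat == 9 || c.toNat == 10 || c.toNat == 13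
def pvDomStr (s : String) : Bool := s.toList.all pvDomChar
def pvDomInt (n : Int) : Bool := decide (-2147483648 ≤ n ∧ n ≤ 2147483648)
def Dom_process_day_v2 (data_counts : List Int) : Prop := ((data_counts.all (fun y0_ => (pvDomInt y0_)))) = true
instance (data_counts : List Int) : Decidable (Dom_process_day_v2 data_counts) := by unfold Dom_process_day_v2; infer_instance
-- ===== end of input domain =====

-- B replaces A's per-index shift loop with a single slice-based rotation; objective: simpler.
-- Both Pythons mutate the argument in place and return it; the theorem is about the returned
-- value (which equals the mutated contents in both).

-- ===== PORT A =====
-- the body of A's 'for i in range(1,9)' loop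
def pvStepA (dc : List Int) (i : Int) : List Int :=
  let to_add := PySem.List.pyGetD dc i 0
  let to_subtract := PySem.List.pyGetD dc (i - 1) 0
  let dc := PySem.List.pySetD dc (i - 1) (PySem.List.pyGetD dc (i - 1) 0 + to_add)
  PySem.List.pySetD dc (i - 1) (PySem.List.pyGetD dc (i - 1) 0 - to_subtract)

def process_day_v2 (data_counts : List Int) : List Int :=
  let num_zeroes := PySem.List.pyGetD data_counts 0 0
  let dc := (PySem.List.pyRange 1 9 1).foldl pvStepA data_counts
  let dc := PySem.List.pySetD dc 6 (PySem.List.pyGetD dc 6 0 + num_zeroes)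
  PySem.List.pySetD dc 8 num_zeroes

-- ===== PORT B =====
def process_day_v2_alt (data_counts : List Int) : List Int :=
  let zeros := PySem.List.pyGetD data_counts 0 0
  let shifted := PySem.List.slice data_counts (some 1) (some 9) ++ [zeros]
      ++ PySem.List.slice data_counts (some 9) none
  PySem.List.pySetD shifted 6 (PySem.List.pyGetD shifted 6 0 + zeros)

-- ===== PRECONDITION & SPEC =====
-- A indexes data_counts[0..8], so it raises IndexError on any list shorter than 9.
def Pre_process_day_v2 (data_counts : List Int) : Prop := 9 ≤ data_counts.length
instance (data_counts : List Int) : Decidable (Pre_process_day_v2 data_counts) := by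
  unfold Pre_process_day_v2; infer_instance

def pvWitness_process_day_v2 : List Int := [3, 1, 4, 1, 5, 9, 2, 6, 5]

def Spec_process_day_v2 (data_counts : List Int) (out : List Int) : Prop :=
  out = process_day_v2_alt data_counts
instance (data_counts : List Int) (out : List Int) : Decidable (Spec_process_day_v2 data_counts out) := by
  unfold Spec_process_day_v2; infer_instance

-- ===== CLAIM (what is proved, stated in full; the proofs are below) =====
def Claim_equal_process_day_v2 : Prop := ∀ (data_counts : List Int), Dom_process_day_v2 data_counts → Pre_process_day_v2 data_counts → Spec_process_day_v2 data_counts (process_day_v2 data_counts)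

-- ===== LEMMAS AND PROOFS =====
set_option maxHeartbeats 1000000 in
theorem pv_main (a0 a1 a2 a3 a4 a5 a6 a7 a8 : Int) (xs : List Int) :
    process_day_v2 (a0::a1::a2::a3::a4::a5::a6::a7::a8::xs)
      = process_day_v2_alt (a0::a1::a2::a3::a4::a5::a6::a7::a8::xs) := by
  have hr : PySem.List.pyRange 1 9 1 = [1,2,3,4,5,6,7,8] := by decide
  have h1 : ∀ (b : Int) (l : List Int), pvStepA (b::a1::l) 1 = a1::a1::l := by
    intro b l; simp [pvStepA, pysem]
  have h2 : ∀ (b c : Int) (l : List Int), pvStepA (b::c::a2::l) 2 = b::a2::a2::l := by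
    intro b c l; simp [pvStepA, pysem]
  have h3 : ∀ (b c d : Int) (l : List Int), pvStepA (b::c::d::a3::l) 3 = b::c::a3::a3::l := by
    intro b c d l; simp [pvStepA, pysem]
  have h4 : ∀ (b c d e : Int) (l : List Int), pvStepA (b::c::d::e::a4::l) 4 = b::c::d::a4::a4::l := by
    intro b c d e l; simp [pvStepA, pysem]
  have h5 : ∀ (b c d e f : Int) (l : List Int), pvStepA (b::c::d::e::f::a5::l) 5 = b::c::d::e::a5::a5::l := by
    intro b c d e f l; simp [pvStepA, pysem]
  have h6 : ∀ (b c d e f g : Int) (l : List Int), pvStepA (b::c::d::e::f::g::a6::l) 6 = b::c::d::e::f::a6::a6::l := by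
    intro b c d e f g l; simp [pvStepA, pysem]
  have h7 : ∀ (b c d e f g h : Int) (l : List Int), pvStepA (b::c::d::e::f::g::h::a7::l) 7 = b::c::d::e::f::g::a7::a7::l := by
    intro b c d e f g h l; simp [pvStepA, pysem]
  have h8 : ∀ (b c d e f g h k : Int) (l : List Int), pvStepA (b::c::d::e::f::g::h::k::a8::l) 8 = b::c::d::e::f::g::h::a8::a8::l := by
    intro b c d e f g h k l; simp [pvStepA, pysem]
  unfold process_day_v2 process_day_v2_alt
  rw [hr]
  simp only [List.foldl_cons, List.foldl_nil, h1, h2, h3, h4, h5, h6, h7, h8]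
  simp [pysem]

-- ===== VERDICT (by name: the statement is the Claim_ definition above) =====
theorem process_day_v2_spec : Claim_equal_process_day_v2 := by
  intro xs _ hpre
  unfold Pre_process_day_v2 at hpre
  obtain ⟨a0, xs, rfl⟩ : ∃ y ys, xs = y :: ys := by
    cases xs with | nil => simp at hpre | cons y ys => exact ⟨y, ys, rfl⟩
  obtain ⟨a1, xs, rfl⟩ : ∃ y ys, xs = y :: ys := by
    cases xs with | nil => simp at hpre | cons y ys => exact ⟨y, ys, rfl⟩
  obtain ⟨a2, xs, rfl⟩ : ∃ y ys, xs = y :: ys := by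
    cases xs with | nil => simp at hpre | cons y ys => exact ⟨y, ys, rfl⟩
  obtain ⟨a3, xs, rfl⟩ : ∃ y ys, xs = y :: ys := by
    cases xs with | nil => simp at hpre | cons y ys => exact ⟨y, ys, rfl⟩
  obtain ⟨a4, xs, rfl⟩ : ∃ y ys, xs = y :: ys := by
    cases xs with | nil => simp at hpre | cons y ys => exact ⟨y, ys, rfl⟩
  obtain ⟨a5, xs, rfl⟩ : ∃ y ys, xs = y :: ys := by
    cases xs with | nil => simp at hpre | cons y ys => exact ⟨y, ys, rfl⟩
  obtain ⟨a6, xs, rfl⟩ : ∃ y ys, xs = y :: ys := by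
    cases xs with | nil => simp at hpre | cons y ys => exact ⟨y, ys, rfl⟩
  obtain ⟨a7, xs, rfl⟩ : ∃ y ys, xs = y :: ys := by
    cases xs with | nil => simp at hpre | cons y ys => exact ⟨y, ys, rfl⟩
  obtain ⟨a8, xs, rfl⟩ : ∃ y ys, xs = y :: ys := by
    cases xs with | nil => simp at hpre | cons y ys => exact ⟨y, ys, rfl⟩
  exact pv_main a0 a1 a2 a3 a4 a5 a6 a7 a8 xs
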